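-- pv_equiv track=rewrite | github.com/grammd/grammd.github.io | scripts/remove-footer-cta.py | extract_framer_1uotk10
-- ===== SOURCE A (Python) =====
-- def extract_framer_1uotk10(html):
--     """Extract the framer-1uotk10 div with proper nesting."""
--     start = html.find('<div class="framer-1uotk10"')
--     if start < 0:
--         return None, None, None
--     depth = 0
--     i = start
--     while i < len(html):
--         if html[i : i + 4] == "<div" and (
--             i + 4 >= len(html) or html[i + 4] in " \t>"
--         ):
--             depth += 1
--         elif html[i : i + 6] == "</div>":
--             depth -= 1
--             if depth == 0:
--                 return start, i + 6, html[start : i + 6]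
--         i += 1
--     return None, None, None
-- ===== SOURCE B (Python) =====
-- def extract_framer_1uotk10(html):
--     """Extract the framer-1uotk10 div by jumping between div-tag occurrences with str.find."""
--     start = html.find('<div class="framer-1uotk10"')
--     if start < 0:
--         return None, None, None
--     depth = 0
--     pos = start
--     while True:
--         o = html.find('<div', pos)
--         c = html.find('</div>', pos)
--         if o == -1 and c == -1:
--             return None, None, None
--         if c == -1 or (o != -1 and o < c):
--             if o + 4 >= len(html) or html[o + 4] in ' \t>':
--                 depth += 1
--             pos = o + 4
--         else:
--             depth -= 1
--             if depth == 0: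
--                 return start, c + 6, html[start:c + 6]
--             pos = c + 6
-- ===== Notes on version B (the rewrite author's own statement) =====
-- stated objective: alternative
-- what changed: B replaces A's per-index scan (slicing and comparing the tag tokens at every position) by a cursor that jumps with str.find to the next opening/closing div-tag occurrence, processing only token positions.
import Mathlib
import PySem

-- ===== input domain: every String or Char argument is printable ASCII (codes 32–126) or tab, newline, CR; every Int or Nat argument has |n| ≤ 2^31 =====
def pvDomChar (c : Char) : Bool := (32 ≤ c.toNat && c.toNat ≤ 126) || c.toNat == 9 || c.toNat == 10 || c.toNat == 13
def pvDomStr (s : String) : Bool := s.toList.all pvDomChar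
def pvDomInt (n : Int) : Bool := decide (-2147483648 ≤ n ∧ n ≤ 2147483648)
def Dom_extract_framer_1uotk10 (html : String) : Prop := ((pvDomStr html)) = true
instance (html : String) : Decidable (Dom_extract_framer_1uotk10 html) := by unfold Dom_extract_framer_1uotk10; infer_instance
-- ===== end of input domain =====

-- B replaces A's per-index scan by a cursor that jumps with str.find between successive div-tag occurrences (objective: alternative).

-- ===== PORT A =====
-- A's while loop: scan every index i from start, tracking nesting depth.
def extractLoopA (cs : List Char) (start : Int) (i : Nat) (depth : Int) :
    Option Int × Option Int × Option String :=
  if _h : i < cs.length then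
    if PySem.List.slice cs (some (i : Int)) (some ((i : Int) + 4)) = "<div".toList ∧
        (cs.length ≤ i + 4 ∨
          (cs[i + 4]?.any fun ch => ch == ' ' || ch == '\t' || ch == '>') = true) then
      extractLoopA cs start (i + 1) (depth + 1)
    else if PySem.List.slice cs (some (i : Int)) (some ((i : Int) + 6)) = "</div>".toList then
      if depth - 1 = 0 then
        (some start, some ((i : Int) + 6),
          some (String.ofList (PySem.List.slice cs (some start) (some ((i : Int) + 6)))))
      else extractLoopA cs start (i + 1) (depth - 1)
    else extractLoopA cs start (i + 1) depth
  else (none, none, none)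
termination_by cs.length - i

def extract_framer_1uotk10 (html : String) : Option Int × Option Int × Option String :=
  let cs := html.toList
  let start := PySem.Chars.find cs ("<div class=\"framer-1uotk10\"".toList)
  if start < 0 then (none, none, none)
  else extractLoopA cs start start.toNat 0

-- ===== PORT B =====
-- B's while True loop: jump using find; fuel is only a totality guard (each step advances pos by ≥ 4).
def extractLoopB (cs : List Char) (start : Int) (fuel : Nat) (pos : Nat) (depth : Int) :
    Option Int × Option Int × Option String :=
  match fuel with
  | 0 => (none, none, none)
  | fuel + 1 =>
    let o := PySem.Chars.findFrom cs "<div".toList (pos : Int) none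
    let c := PySem.Chars.findFrom cs "</div>".toList (pos : Int) none
    if o = -1 ∧ c = -1 then (none, none, none)
    else if c = -1 ∨ (o ≠ -1 ∧ o < c) then
      let depth' :=
        if cs.length ≤ o.toNat + 4 ∨
            (cs[o.toNat + 4]?.any fun ch => ch == ' ' || ch == '\t' || ch == '>') = true then
          depth + 1
        else depth
      extractLoopB cs start fuel (o.toNat + 4) depth'
    else
      if depth - 1 = 0 then
        (some start, some (c + 6),
          some (String.ofList (PySem.List.slice cs (some start) (some (c + 6)))))
      else extractLoopB cs start fuel (c.toNat + 6) (depth - 1)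

def extract_framer_1uotk10_alt (html : String) : Option Int × Option Int × Option String :=
  let cs := html.toList
  let start := PySem.Chars.find cs ("<div class=\"framer-1uotk10\"".toList)
  if start < 0 then (none, none, none)
  else extractLoopB cs start (cs.length + 1) start.toNat 0

-- ===== PRECONDITION & SPEC =====
def Spec_extract_framer_1uotk10 (html : String) (out : Option Int × Option Int × Option String) : Prop := out = extract_framer_1uotk10_alt html
instance (html : String) (out : Option Int × Option Int × Option String) : Decidable (Spec_extract_framer_1uotk10 html out) := by unfold Spec_extract_framer_1uotk10; infer_instance

-- ===== CLAIM (what is proved, stated in full; the proofs are below) =====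
def Claim_equal_extract_framer_1uotk10 : Prop := ∀ (html : String), Dom_extract_framer_1uotk10 html → Spec_extract_framer_1uotk10 html (extract_framer_1uotk10 html)

-- ===== LEMMAS AND PROOFS =====

theorem extractLoopA_stop (cs : List Char) (start : Int) (i : Nat) (depth : Int)
    (h : cs.length ≤ i) : extractLoopA cs start i depth = (none, none, none) := by
  rw [extractLoopA]; simp [Nat.not_lt.mpr h]

theorem go_eq_neg_one_iff (sub : List Char) (hsub : sub ≠ []) :
    ∀ (l : List Char) (k : Nat),
      PySem.Chars.find.go sub l k = -1 ↔ ∀ j, ¬ sub <+: l.drop j := by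
  intro l
  induction l with
  | nil =>
    intro k
    simp [PySem.Chars.find.go, List.isEmpty_iff, hsub, List.prefix_iff_eq_take]
  | cons h t ih =>
    intro k
    rw [PySem.Chars.find.go]
    by_cases hp : sub.isPrefixOf (h :: t)
    · simp only [hp, if_pos]
      constructor
      · intro hk; omega
      · intro hall; exact absurd (List.isPrefixOf_iff_prefix.mp hp) (by simpa using hall 0)
    · simp only [hp, Bool.false_eq_true, ite_false]
      rw [ih (k + 1)]
      constructor
      · intro hall j
        cases j with
        | zero => simpa using fun hc => hp (List.isPrefixOf_iff_prefix.mpr hc)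
        | succ j => simpa using hall j
      · intro hall j; simpa using hall (j + 1)

theorem go_spec (sub : List Char) (hsub : sub ≠ []) :
    ∀ (l : List Char) (k : Nat), PySem.Chars.find.go sub l k ≠ -1 →
      ∃ j : Nat, PySem.Chars.find.go sub l k = (k : Int) + j ∧ sub <+: l.drop j ∧
        ∀ j' < j, ¬ sub <+: l.drop j' := by
  intro l
  induction l with
  | nil =>
    intro k hk
    exfalso; apply hk; simp [PySem.Chars.find.go, List.isEmpty_iff, hsub]
  | cons h t ih =>
    intro k hk
    rw [PySem.Chars.find.go] at *
    by_cases hp : sub.isPrefixOf (h :: t)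
    · refine ⟨0, ?_, ?_, ?_⟩
      · simp [hp]
      · simpa using List.isPrefixOf_iff_prefix.mp hp
      · omega
    · simp only [hp, Bool.false_eq_true, ite_false] at hk ⊢
      obtain ⟨j, h1, h2, h3⟩ := ih (k + 1) hk
      refine ⟨j + 1, by rw [h1]; push_cast; ring, by simpa using h2, ?_⟩
      intro j' hj'
      cases j' with
      | zero => simpa using fun hc => hp (List.isPrefixOf_iff_prefix.mpr hc)
      | succ j' => simpa using h3 j' (by omega)

theorem findFrom_gt (cs sub : List Char) (pos : Nat) (h : cs.length < pos) :
    PySem.Chars.findFrom cs sub (pos : Int) none = -1 := by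
  unfold PySem.Chars.findFrom
  simp only
  rw [if_pos (by omega)]

theorem findFrom_eq_neg_one_iff (cs sub : List Char) (pos : Nat) (hsub : sub ≠ [])
    (hpos : pos ≤ cs.length) :
    PySem.Chars.findFrom cs sub (pos : Int) none = -1 ↔
      ∀ k, pos ≤ k → ¬ sub <+: cs.drop k := by
  rw [PySem.Chars.findFrom_natCast cs sub pos hpos]
  unfold PySem.Chars.find
  by_cases hG : PySem.Chars.find.go sub (cs.drop pos) 0 = -1
  · rw [if_pos hG]
    simp only [true_iff]
    intro k hk
    have hall := (go_eq_neg_one_iff sub hsub (cs.drop pos) 0).mp hG (k - pos)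
    rwa [List.drop_drop, show pos + (k - pos) = k by omega] at hall
  · rw [if_neg hG]
    obtain ⟨j, h1, h2, _⟩ := go_spec sub hsub (cs.drop pos) 0 hG
    constructor
    · intro habs; rw [h1] at habs; omega
    · intro hall
      rw [List.drop_drop] at h2
      exact absurd h2 (hall (pos + j) (by omega))

theorem findFrom_spec (cs sub : List Char) (pos : Nat) (hsub : sub ≠ [])
    (hpos : pos ≤ cs.length) (h : PySem.Chars.findFrom cs sub (pos : Int) none ≠ -1) :
    ∃ m : Nat, PySem.Chars.findFrom cs sub (pos : Int) none = (m : Int) ∧ pos ≤ m ∧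
      sub <+: cs.drop m ∧ ∀ k, pos ≤ k → k < m → ¬ sub <+: cs.drop k := by
  rw [PySem.Chars.findFrom_natCast cs sub pos hpos] at *
  unfold PySem.Chars.find at *
  by_cases hG : PySem.Chars.find.go sub (cs.drop pos) 0 = -1
  · exact absurd (if_pos hG) h
  · rw [if_neg hG]
    obtain ⟨j, h1, h2, h3⟩ := go_spec sub hsub (cs.drop pos) 0 hG
    refine ⟨pos + j, by rw [h1]; push_cast; ring, by omega, ?_, ?_⟩
    · rwa [List.drop_drop] at h2
    · intro k hk hkm
      have := h3 (k - pos) (by omega)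
      rw [List.drop_drop] at this
      rwa [show pos + (k - pos) = k by omega] at this

theorem tO_eq : "<div".toList = ['<', 'd', 'i', 'v'] := rfl

theorem tC_eq : "</div>".toList = ['<', '/', 'd', 'i', 'v', '>'] := rfl

theorem slice_eq_iff_prefix (cs t : List Char) (i n : Nat) (hn : t.length = n) :
    PySem.List.slice cs (some (i : Int)) (some ((i : Int) + (n : Int))) = t ↔ t <+: cs.drop i := by
  rw [PySem.List.slice_natCast_add, List.prefix_iff_eq_take, ← hn]
  constructor <;> intro h <;> exact h.symm

theorem slice4_iff (cs : List Char) (i : Nat) :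
    PySem.List.slice cs (some (i : Int)) (some ((i : Int) + 4)) = "<div".toList ↔
      "<div".toList <+: cs.drop i := by
  simpa using slice_eq_iff_prefix cs "<div".toList i 4 (by decide)

theorem slice6_iff (cs : List Char) (i : Nat) :
    PySem.List.slice cs (some (i : Int)) (some ((i : Int) + 6)) = "</div>".toList ↔
      "</div>".toList <+: cs.drop i := by
  simpa using slice_eq_iff_prefix cs "</div>".toList i 6 (by decide)

theorem not_both (l : List Char) (h1 : "<div".toList <+: l) : ¬ "</div>".toList <+: l := by
  rw [tO_eq] at h1; rw [tC_eq]
  obtain ⟨r, rfl⟩ := h1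
  intro h2
  simp [List.cons_prefix_cons] at h2

theorem extractLoopA_step_skip (cs : List Char) (st : Int) (i : Nat) (depth : Int)
    (hi : i < cs.length)
    (hO : ¬ "<div".toList <+: cs.drop i) (hC : ¬ "</div>".toList <+: cs.drop i) :
    extractLoopA cs st i depth = extractLoopA cs st (i + 1) depth := by
  rw [extractLoopA, dif_pos hi,
    if_neg (fun h => hO ((slice4_iff cs i).mp h.1)),
    if_neg (fun h => hC ((slice6_iff cs i).mp h))]

theorem extractLoopA_skip (cs : List Char) (st : Int) (depth : Int) (j : Nat)
    (hj : j ≤ cs.length) :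
    ∀ (d pos : Nat), j - pos = d → pos ≤ j →
      (∀ k, pos ≤ k → k < j → ¬ "<div".toList <+: cs.drop k ∧ ¬ "</div>".toList <+: cs.drop k) →
      extractLoopA cs st pos depth = extractLoopA cs st j depth := by
  intro d
  induction d with
  | zero =>
    intro pos h1 h2 _
    have : pos = j := by omega
    rw [this]
  | succ n ih =>
    intro pos h1 h2 hno
    have hpj : pos < j := by omega
    rw [extractLoopA_step_skip cs st pos depth (by omega) (hno pos le_rfl hpj).1
      (hno pos le_rfl hpj).2]
    exact ih (pos + 1) (by omega) (by omega) (fun k hk hk2 => hno k (by omega) hk2)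


theorem no_tok_of_head (c : Char) (l : List Char) (hc : c ≠ '<') :
    ¬ "<div".toList <+: c :: l ∧ ¬ "</div>".toList <+: c :: l := by
  rw [tO_eq, tC_eq]
  constructor <;> intro h <;> exact hc (List.cons_prefix_cons.mp h).1.symm

theorem drop_add_eq (cs : List Char) (m : Nat) (t : List Char) (e : cs.drop m = t) :
    ∀ j, cs.drop (m + j) = t.drop j := by
  intro j
  conv_rhs => rw [← e]
  rw [List.drop_drop]

theorem noTok_open (cs : List Char) (m : Nat) (r : List Char)
    (e : cs.drop m = '<' :: 'd' :: 'i' :: 'v' :: r) :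
    ∀ k, m + 1 ≤ k → k < m + 4 →
      ¬ "<div".toList <+: cs.drop k ∧ ¬ "</div>".toList <+: cs.drop k := by
  intro k h1 h2
  have hd := drop_add_eq cs m _ e
  have hk : k = m + 1 ∨ k = m + 2 ∨ k = m + 3 := by omega
  rcases hk with h | h | h <;> subst h
  · rw [hd 1]; exact no_tok_of_head 'd' _ (by decide)
  · rw [hd 2]; exact no_tok_of_head 'i' _ (by decide)
  · rw [hd 3]; exact no_tok_of_head 'v' _ (by decide)

theorem noTok_close (cs : List Char) (m : Nat) (r : List Char)
    (e : cs.drop m = '<' :: '/' :: 'd' :: 'i' :: 'v' :: '>' :: r) :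
    ∀ k, m + 1 ≤ k → k < m + 6 →
      ¬ "<div".toList <+: cs.drop k ∧ ¬ "</div>".toList <+: cs.drop k := by
  intro k h1 h2
  have hd := drop_add_eq cs m _ e
  have hk : k = m + 1 ∨ k = m + 2 ∨ k = m + 3 ∨ k = m + 4 ∨ k = m + 5 := by omega
  rcases hk with h | h | h | h | h <;> subst h
  · rw [hd 1]; exact no_tok_of_head '/' _ (by decide)
  · rw [hd 2]; exact no_tok_of_head 'd' _ (by decide)
  · rw [hd 3]; exact no_tok_of_head 'i' _ (by decide)
  · rw [hd 4]; exact no_tok_of_head 'v' _ (by decide)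
  · rw [hd 5]; exact no_tok_of_head '>' _ (by decide)

theorem loopA_opener (cs : List Char) (st : Int) (depth : Int) (pos m : Nat)
    (hm : pos ≤ m) (hpre : "<div".toList <+: cs.drop m)
    (hmin : ∀ k, pos ≤ k → k < m →
      ¬ "<div".toList <+: cs.drop k ∧ ¬ "</div>".toList <+: cs.drop k) :
    extractLoopA cs st pos depth = extractLoopA cs st (m + 4)
      (if cs.length ≤ m + 4 ∨
          (cs[m + 4]?.any fun ch => ch == ' ' || ch == '\t' || ch == '>') = true
       then depth + 1 else depth) := by
  obtain ⟨r, e⟩ := hpre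
  have e' : cs.drop m = '<' :: 'd' :: 'i' :: 'v' :: r := by rw [← e]; rfl
  have hlen : m + 4 ≤ cs.length := by
    have := congrArg List.length e'
    simp [List.length_drop] at this
    omega
  rw [extractLoopA_skip cs st depth m (by omega) (m - pos) pos rfl hm hmin]
  rw [extractLoopA, dif_pos (show m < cs.length by omega)]
  have hsl : PySem.List.slice cs (some (m : Int)) (some ((m : Int) + 4)) = "<div".toList :=
    (slice4_iff cs m).mpr ⟨r, e⟩
  by_cases hb : cs.length ≤ m + 4 ∨
      (cs[m + 4]?.any fun ch => ch == ' ' || ch == '\t' || ch == '>') = true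
  · rw [if_pos ⟨hsl, hb⟩, if_pos hb]
    exact extractLoopA_skip cs st (depth + 1) (m + 4) hlen 3 (m + 1) (by omega) (by omega)
      (noTok_open cs m r e')
  · rw [if_neg (fun h => hb h.2),
      if_neg (fun h => not_both _ ⟨r, e⟩ ((slice6_iff cs m).mp h)), if_neg hb]
    exact extractLoopA_skip cs st depth (m + 4) hlen 3 (m + 1) (by omega) (by omega)
      (noTok_open cs m r e')

theorem loopA_closer (cs : List Char) (st : Int) (depth : Int) (pos m : Nat)
    (hm : pos ≤ m) (hpre : "</div>".toList <+: cs.drop m)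
    (hmin : ∀ k, pos ≤ k → k < m →
      ¬ "<div".toList <+: cs.drop k ∧ ¬ "</div>".toList <+: cs.drop k) :
    extractLoopA cs st pos depth =
      if depth - 1 = 0 then
        (some st, some ((m : Int) + 6),
          some (String.ofList (PySem.List.slice cs (some st) (some ((m : Int) + 6)))))
      else extractLoopA cs st (m + 6) (depth - 1) := by
  obtain ⟨r, e⟩ := hpre
  have e' : cs.drop m = '<' :: '/' :: 'd' :: 'i' :: 'v' :: '>' :: r := by rw [← e]; rfl
  have hlen : m + 6 ≤ cs.length := by
    have := congrArg List.length e'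
    simp [List.length_drop] at this
    omega
  rw [extractLoopA_skip cs st depth m (by omega) (m - pos) pos rfl hm hmin]
  rw [extractLoopA, dif_pos (show m < cs.length by omega)]
  rw [if_neg (fun h => not_both _ ((slice4_iff cs m).mp h.1) ⟨r, e⟩),
    if_pos ((slice6_iff cs m).mpr ⟨r, e⟩)]
  by_cases hd : depth - 1 = 0
  · rw [if_pos hd, if_pos hd]
  · rw [if_neg hd, if_neg hd]
    exact extractLoopA_skip cs st (depth - 1) (m + 6) hlen 5 (m + 1) (by omega) (by omega)
      (noTok_close cs m r e')

theorem loops_agree (cs : List Char) (start : Int) :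
    ∀ (fuel pos : Nat) (depth : Int), cs.length + 1 ≤ fuel + pos →
      extractLoopB cs start fuel pos depth = extractLoopA cs start pos depth := by
  intro fuel
  induction fuel with
  | zero =>
    intro pos depth hf
    rw [extractLoopB, extractLoopA_stop cs start pos depth (by omega)]
  | succ fuel ih =>
    intro pos depth hf
    by_cases hpos : cs.length < pos
    · rw [extractLoopB]
      simp only [findFrom_gt cs _ pos hpos]
      rw [if_pos ⟨by simp, by simp⟩, extractLoopA_stop cs start pos depth (by omega)]
    · have hpos' : pos ≤ cs.length := by omega
      have hOne : ("<div".toList : List Char) ≠ [] := by decide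
      have hCne : ("</div>".toList : List Char) ≠ [] := by decide
      rw [extractLoopB]
      by_cases ho : PySem.Chars.findFrom cs "<div".toList (pos : Int) none = -1 <;>
        by_cases hc : PySem.Chars.findFrom cs "</div>".toList (pos : Int) none = -1
      · -- no token at all: both are (none, none, none)
        simp only [ho, hc]
        rw [if_pos ⟨trivial, trivial⟩]
        rw [extractLoopA_skip cs start depth cs.length le_rfl (cs.length - pos) pos rfl hpos'
          (fun k hk _ => ⟨(findFrom_eq_neg_one_iff cs _ pos hOne hpos').mp ho k hk,
            (findFrom_eq_neg_one_iff cs _ pos hCne hpos').mp hc k hk⟩),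
          extractLoopA_stop cs start cs.length depth le_rfl]
      · -- only a closer occurs
        obtain ⟨mc, hceq, hmc, hpreC, hminC⟩ := findFrom_spec cs _ pos hCne hpos' hc
        simp only [ho, hceq, Int.toNat_natCast]
        rw [if_neg (by omega), if_neg (by omega)]
        rw [loopA_closer cs start depth pos mc hmc hpreC
          (fun k hk1 hk2 => ⟨(findFrom_eq_neg_one_iff cs _ pos hOne hpos').mp ho k hk1,
            hminC k hk1 hk2⟩)]
        by_cases hd : depth - 1 = 0
        · rw [if_pos hd, if_pos hd]
        · rw [if_neg hd, if_neg hd]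
          exact ih (mc + 6) (depth - 1) (by omega)
      · -- only an opener occurs
        obtain ⟨mo, hoeq, hmo, hpreO, hminO⟩ := findFrom_spec cs _ pos hOne hpos' ho
        simp only [hoeq, hc, Int.toNat_natCast]
        rw [if_neg (by omega), if_pos (Or.inl trivial)]
        rw [loopA_opener cs start depth pos mo hmo hpreO
          (fun k hk1 hk2 => ⟨hminO k hk1 hk2,
            (findFrom_eq_neg_one_iff cs _ pos hCne hpos').mp hc k hk1⟩)]
        exact ih (mo + 4) _ (by omega)
      · -- both occur: the smaller index wins (they are never equal)
        obtain ⟨mo, hoeq, hmo, hpreO, hminO⟩ := findFrom_spec cs _ pos hOne hpos' ho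
        obtain ⟨mc, hceq, hmc, hpreC, hminC⟩ := findFrom_spec cs _ pos hCne hpos' hc
        have hne : mo ≠ mc := fun h => not_both _ hpreO (h ▸ hpreC)
        simp only [hoeq, hceq, Int.toNat_natCast]
        by_cases hoc : mo < mc
        · have hc1 : ¬(((mo : Nat) : Int) = -1 ∧ ((mc : Nat) : Int) = -1) := by omega
          have hc2 : (((mc : Nat) : Int) = -1 ∨ (((mo : Nat) : Int) ≠ -1 ∧ ((mo : Nat) : Int) < ((mc : Nat) : Int))) := Or.inr ⟨by omega, by omega⟩
          rw [if_neg hc1, if_pos hc2]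
          rw [loopA_opener cs start depth pos mo hmo hpreO
            (fun k hk1 hk2 => ⟨hminO k hk1 hk2, hminC k hk1 (by omega)⟩)]
          exact ih (mo + 4) _ (by omega)
        · have hlt : mc < mo := by omega
          have hc1 : ¬(((mo : Nat) : Int) = -1 ∧ ((mc : Nat) : Int) = -1) := by omega
          have hc2 : ¬(((mc : Nat) : Int) = -1 ∨ (((mo : Nat) : Int) ≠ -1 ∧ ((mo : Nat) : Int) < ((mc : Nat) : Int))) := by omega
          rw [if_neg hc1, if_neg hc2]
          rw [loopA_closer cs start depth pos mc hmc hpreC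
            (fun k hk1 hk2 => ⟨hminO k hk1 (by omega), hminC k hk1 hk2⟩)]
          by_cases hd : depth - 1 = 0
          · rw [if_pos hd, if_pos hd]
          · rw [if_neg hd, if_neg hd]
            exact ih (mc + 6) (depth - 1) (by omega)

-- ===== VERDICT (by name: the statement is the Claim_ definition above) =====
theorem extract_framer_1uotk10_spec : Claim_equal_extract_framer_1uotk10 := by
  intro html _
  unfold Spec_extract_framer_1uotk10 extract_framer_1uotk10 extract_framer_1uotk10_alt
  simp only
  split
  · rfl
  · exact (loops_agree _ _ _ _ _ (by omega)).symm
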